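-- pv_equiv track=rewrite | github.com/jayelmeynak/LeetCode | line_reflection.py | isReflection
-- ===== SOURCE A (Python) =====
-- from typing import List
--
-- def isReflection(points: List[List[int]]) -> bool:
--     points_set = set()
--     min_x = float("inf")
--     max_x = float("-inf")
--     for x, y in points:
--         points_set.add((x, y))
--         min_x = min(min_x, x)
--         max_x = max(max_x, x)
--     sum = min_x + max_x
--     answer = True
--     for x, y in points:
--         if (sum - x, y) not in points_set:
--             answer = False
--             return answer
--     return answer
-- ===== SOURCE B (Python) =====
-- from typing import List
--
-- def isReflection(points: List[List[int]]) -> bool: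
--     # Group distinct x-values by y, find the axis from global min/max x, then
--     # for each y-group walk a sorted list with two pointers from both ends:
--     # every opposing pair (and a lone middle element) must sum to min_x+max_x.
--     if not points:
--         return True
--     groups = {}
--     for x, y in points:
--         if y in groups:
--             groups[y].add(x)
--         else:
--             groups[y] = {x}
--     all_x = [x for xs in groups.values() for x in xs]
--     s = min(all_x) + max(all_x)
--     for xs in groups.values():
--         l = sorted(xs)
--         i, j = 0, len(l) - 1
--         while i <= j:
--             if l[i] + l[j] != s:
--                 return False
--             i += 1
--             j -= 1
--     return True
-- ===== Notes on version B (the rewrite author's own statement) =====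
-- stated objective: alternative
-- what changed: A hashes all points and checks each point's mirror for set membership; B instead groups distinct x-values by y-coordinate in a dict, sorts each group's x-values, and verifies symmetry with two pointers moving inward (each opposing pair must sum to min_x+max_x), never constructing or looking up mirror points.
import Mathlib
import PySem

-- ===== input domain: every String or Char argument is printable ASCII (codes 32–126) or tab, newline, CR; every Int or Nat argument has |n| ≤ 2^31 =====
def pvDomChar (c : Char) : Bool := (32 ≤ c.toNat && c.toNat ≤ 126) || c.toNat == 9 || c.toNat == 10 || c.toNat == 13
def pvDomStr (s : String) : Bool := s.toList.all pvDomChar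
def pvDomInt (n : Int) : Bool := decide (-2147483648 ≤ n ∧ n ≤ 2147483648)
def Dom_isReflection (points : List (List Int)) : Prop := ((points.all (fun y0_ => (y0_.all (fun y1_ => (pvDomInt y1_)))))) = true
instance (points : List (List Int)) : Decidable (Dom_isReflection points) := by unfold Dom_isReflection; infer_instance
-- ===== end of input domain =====

-- B replaces A's per-point mirror-membership check by grouping distinct x-values per y in a dict,
-- sorting each group and verifying symmetry with two pointers (pairs summing to min_x+max_x); alternative, not faster.


-- ===== PORT A =====
-- Python's float("inf")/float("-inf") seeds are modelled by Option Int accumulators: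
-- 'none' is the untouched infinite seed; after the first point the accumulator is an Int,
-- exactly as in Python (all further mins/maxes are over ints). On empty input Python's
-- second loop never reads 'sum', so the match's fallback branch returns True as Python does.
def isReflectionCheck (s : Int) (S : PySem.Set (Int × Int)) : List (List Int) → Bool
  | [] => true
  | p :: rest =>
      if PySem.Set.contains S (s - p.getD 0 0, p.getD 1 0) then isReflectionCheck s S rest
      else false

def isReflection (points : List (List Int)) : Bool :=
  let st := points.foldl
    (fun (acc : PySem.Set (Int × Int) × Option Int × Option Int) p =>
      let x := p.getD 0 0
      let y := p.getD 1 0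
      (PySem.Set.add acc.1 (x, y),
       some (match acc.2.1 with | none => x | some m => min m x),
       some (match acc.2.2 with | none => x | some m => max m x)))
    (PySem.Set.empty, none, none)
  match st.2.1, st.2.2 with
  | some mn, some mx => isReflectionCheck (mn + mx) st.1 points
  | _, _ => true

-- ===== PORT B =====
-- B's grouping loop: dict mapping y to the set of x-values at that y.
def pvGroups (points : List (List Int)) : PySem.Dict Int (PySem.Set Int) :=
  points.foldl
    (fun d p =>
      PySem.Dict.insert d (p.getD 1 0)
        (PySem.Set.add (PySem.Dict.getD d (p.getD 1 0) PySem.Set.empty) (p.getD 0 0)))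
    PySem.Dict.empty

-- B's two-pointer scan over a sorted list: l[i] + l[j] must equal s while the pointers move inward.
def twoPtrCheck (l : List Int) (s : Int) (i j : Nat) : Bool :=
  if i ≤ j then
    if l.getD i 0 + l.getD j 0 ≠ s then false
    else twoPtrCheck l s (i + 1) (j - 1)
  else true
termination_by j + 1 - i
decreasing_by omega

def isReflection_alt (points : List (List Int)) : Bool :=
  match points with
  | [] => true
  | _ :: _ =>
    let G := pvGroups points
    let allX : List Int := (PySem.Dict.values G).flatMap (fun xs => xs)
    let s := ((PySem.List.min? allX (fun v => v)).getD 0)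
           + ((PySem.List.max? allX (fun v => v)).getD 0)
    (PySem.Dict.values G).all (fun xs =>
      let l := PySem.List.sorted xs (fun v => v) false
      twoPtrCheck l s 0 (l.length - 1))

-- ===== PRECONDITION & SPEC =====
-- Pre_ excludes inner lists whose length is not 2: there Python's 'for x, y in points' raises ValueError.
def Pre_isReflection (points : List (List Int)) : Prop := ∀ p ∈ points, p.length = 2
instance (points : List (List Int)) : Decidable (Pre_isReflection points) := by unfold Pre_isReflection; infer_instance
def pvWitness_isReflection : List (List Int) := [[0, 1], [2, 1]]
def Spec_isReflection (points : List (List Int)) (out : Bool) : Prop := out = isReflection_alt points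
instance (points : List (List Int)) (out : Bool) : Decidable (Spec_isReflection points out) := by unfold Spec_isReflection; infer_instance

-- ===== CLAIM (what is proved, stated in full; the proofs are below) =====
def Claim_equal_isReflection : Prop := ∀ (points : List (List Int)), Dom_isReflection points → Pre_isReflection points → Spec_isReflection points (isReflection points)

-- ===== LEMMAS AND PROOFS =====

-- ---- A-side: splitting A's single fold into its three components ----
def pvOMin (o : Option Int) (x : Int) : Option Int :=
  some (match o with | none => x | some m => min m x)

def pvOMax (o : Option Int) (x : Int) : Option Int :=
  some (match o with | none => x | some m => max m x)

theorem pvFoldSplit (points : List (List Int)) (acc : PySem.Set (Int × Int) × Option Int × Option Int) :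
    points.foldl
      (fun (acc : PySem.Set (Int × Int) × Option Int × Option Int) p =>
        let x := p.getD 0 0
        let y := p.getD 1 0
        (PySem.Set.add acc.1 (x, y),
         some (match acc.2.1 with | none => x | some m => min m x),
         some (match acc.2.2 with | none => x | some m => max m x)))
      acc
    = ((points.map (fun p => ((p.getD 0 0 : Int), (p.getD 1 0 : Int)))).foldl PySem.Set.add acc.1,
       (points.map (fun p => p.getD 0 0)).foldl pvOMin acc.2.1,
       (points.map (fun p => p.getD 0 0)).foldl pvOMax acc.2.2) := by
  induction points generalizing acc with
  | nil => rfl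
  | cons p rest ih =>
      simp only [List.foldl_cons, List.map_cons]
      rw [ih]
      rfl

theorem pvOMinFold (l : List Int) (a : Int) : l.foldl pvOMin (some a) = some (l.foldl min a) := by
  induction l generalizing a with
  | nil => rfl
  | cons x t ih => simp [pvOMin, ih]

theorem pvOMaxFold (l : List Int) (a : Int) : l.foldl pvOMax (some a) = some (l.foldl max a) := by
  induction l generalizing a with
  | nil => rfl
  | cons x t ih => simp [pvOMax, ih]

theorem pvCheck_iff (s : Int) (S : PySem.Set (Int × Int)) (points : List (List Int)) :
    isReflectionCheck s S points = true ↔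
      ∀ p ∈ points, (s - p.getD 0 0, p.getD 1 0) ∈ S := by
  induction points with
  | nil => simp [isReflectionCheck]
  | cons p rest ih =>
      simp only [isReflectionCheck]
      cases hc : PySem.Set.contains S (s - p.getD 0 0, p.getD 1 0) with
      | true =>
          have hmem := (PySem.Set.contains_iff S _).mp hc
          simp only [if_true, ih]
          constructor
          · intro hall q hq
            rcases List.mem_cons.mp hq with rfl | hq
            · exact hmem
            · exact hall q hq
          · intro hall q hq
            exact hall q (List.mem_cons_of_mem _ hq)
      | false =>
          have hnot : (s - p.getD 0 0, p.getD 1 0) ∉ S := by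
            intro hm
            rw [(PySem.Set.contains_iff S _).mpr hm] at hc
            simp at hc
          simp only [if_false, Bool.false_eq_true, false_iff]
          intro hall
          exact hnot (hall p (List.mem_cons_self))

-- ---- B-side: the two-pointer scan checks exactly the index pairing ----
theorem twoPtr_iff (l : List Int) (s : Int) :
    ∀ (d i j : Nat), j + 1 - i ≤ d →
      (twoPtrCheck l s i j = true ↔ ∀ k, i ≤ k → k ≤ j → l.getD k 0 + l.getD (i + j - k) 0 = s) := by
  intro d
  induction d with
  | zero =>
      intro i j hd
      have hij : ¬ i ≤ j := by omega
      rw [twoPtrCheck]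
      simp only [if_neg hij]
      constructor
      · intro _ k h1 h2; omega
      · intro _; trivial
  | succ d ih =>
      intro i j hd
      by_cases hij : i ≤ j
      · rw [twoPtrCheck]
        simp only [if_pos hij]
        by_cases hs : l.getD i 0 + l.getD j 0 = s
        · rw [if_neg (by simpa using hs)]
          rw [ih (i + 1) (j - 1) (by omega)]
          constructor
          · intro h k h1 h2
            by_cases hki : k = i
            · rw [hki]
              have he : i + j - i = j := by omega
              rw [he]; exact hs
            · by_cases hkj : k = j
              · rw [hkj]
                have he : i + j - j = i := by omega
                rw [he, Int.add_comm]; exact hs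
              · have := h k (by omega) (by omega)
                have he : i + 1 + (j - 1) - k = i + j - k := by omega
                rw [he] at this; exact this
          · intro h k h1 h2
            have := h k (by omega) (by omega)
            have he : i + 1 + (j - 1) - k = i + j - k := by omega
            rw [he]; exact this
        · rw [if_pos (by simpa using hs)]
          simp only [Bool.false_eq_true, false_iff]
          intro h
          have := h i le_rfl hij
          have he : i + j - i = j := by omega
          rw [he] at this; exact hs this
      · rw [twoPtrCheck]
        simp only [if_neg hij]
        constructor
        · intro _ k h1 h2; omega
        · intro _; trivial

-- ---- the index pairing on a strictly increasing nonempty list is closure under x ↦ s - x ----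
theorem pairing_iff_closed (l : List Int) (s : Int) (hne : l ≠ []) (hl : l.Pairwise (· < ·)) :
    (∀ k : Nat, k ≤ l.length - 1 → l.getD k 0 + l.getD (l.length - 1 - k) 0 = s) ↔
      (∀ x ∈ l, s - x ∈ l) := by
  have hn : 0 < l.length := List.length_pos_iff.mpr hne
  constructor
  · intro h x hx
    obtain ⟨k, hk, he⟩ := List.mem_iff_getElem.mp hx
    have hp := h k (by omega)
    rw [List.getD_eq_getElem l 0 (by omega), List.getD_eq_getElem l 0 (by omega)] at hp
    have hgoal : s - x = l[l.length - 1 - k]'(by omega) := by rw [← he]; omega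
    rw [hgoal]
    exact List.getElem_mem _
  · intro hcl
    set r := (l.map (fun x => s - x)).reverse with hr
    have hlnd : l.Nodup := hl.nodup
    have hrnd : r.Nodup := by
      rw [hr, List.nodup_reverse]
      exact hlnd.map (fun a b hab => by omega)
    have hrpw : r.Pairwise (· < ·) := by
      rw [hr, List.pairwise_reverse, List.pairwise_map]
      exact hl.imp (fun hab => by omega)
    have hmemr : ∀ x, x ∈ r ↔ x ∈ l := by
      intro x
      rw [hr]
      simp only [List.mem_reverse, List.mem_map]
      constructor
      · rintro ⟨y, hy, rfl⟩; exact hcl y hy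
      · intro hx
        exact ⟨s - x, hcl x hx, by omega⟩
    have hperm : r.Perm l := (List.perm_ext_iff_of_nodup hrnd hlnd).mpr hmemr
    have heq : r = l := hperm.eq_of_pairwise
      (fun a b _ _ h1 h2 => absurd h2 (lt_asymm h1)) hrpw hl
    intro k hk
    have hk' : k < l.length := by omega
    have hk2 : l.length - 1 - k < l.length := by omega
    rw [List.getD_eq_getElem l 0 hk', List.getD_eq_getElem l 0 hk2]
    have hq : r[k]? = l[k]? := by rw [heq]
    rw [hr, List.getElem?_reverse (by simpa using hk'), List.length_map, List.getElem?_map] at hq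
    rw [List.getElem?_eq_getElem hk2, List.getElem?_eq_getElem hk'] at hq
    simp only [Option.map_some, Option.some.injEq] at hq
    omega

-- ---- the grouping dict ----
theorem pvAdd_ne_nil (s : PySem.Set Int) (x : Int) : PySem.Set.add s x ≠ [] := by
  rw [PySem.Set.add_eq_ite]
  split_ifs with h
  · intro h0; rw [h0] at h; simp at h
  · simp

theorem pvGroups_mem_aux (pts : List (List Int)) :
    ∀ (d : PySem.Dict Int (PySem.Set Int)) (x y : Int),
      x ∈ PySem.Dict.getD
        (pts.foldl (fun d p =>
          PySem.Dict.insert d (p.getD 1 0)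
            (PySem.Set.add (PySem.Dict.getD d (p.getD 1 0) PySem.Set.empty) (p.getD 0 0))) d)
        y PySem.Set.empty
      ↔ x ∈ PySem.Dict.getD d y PySem.Set.empty
        ∨ (x, y) ∈ pts.map (fun p => ((p.getD 0 0 : Int), (p.getD 1 0 : Int))) := by
  induction pts with
  | nil => simp
  | cons p rest ih =>
      intro d x y
      simp only [List.foldl_cons, List.map_cons, List.mem_cons]
      rw [ih]
      rw [PySem.Dict.getD_insert]
      by_cases hy : y = p.getD 1 0
      · subst hy
        rw [if_pos rfl, PySem.Set.mem_add]
        simp only [Prod.mk.injEq]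
        tauto
      · rw [if_neg hy]
        simp only [Prod.mk.injEq]
        tauto

theorem pvGroups_values_good_aux (pts : List (List Int)) :
    ∀ (d : PySem.Dict Int (PySem.Set Int)),
      (∀ v ∈ PySem.Dict.values d, v.Nodup ∧ v ≠ []) →
      ∀ v ∈ PySem.Dict.values
        (pts.foldl (fun d p =>
          PySem.Dict.insert d (p.getD 1 0)
            (PySem.Set.add (PySem.Dict.getD d (p.getD 1 0) PySem.Set.empty) (p.getD 0 0))) d),
        v.Nodup ∧ v ≠ [] := by
  induction pts with
  | nil => intro d hd; exact hd
  | cons p rest ih =>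
      intro d hd
      apply ih
      intro v hv
      rcases PySem.Dict.mem_values_insert _ _ _ _ hv with h | h
      · subst h
        constructor
        · apply PySem.Set.nodup_add
          rcases hg : PySem.Dict.get? d (p.getD 1 0) with _ | w
          · rw [PySem.Dict.getD_of_get?_eq_none _ _ hg]; exact List.nodup_nil
          · rw [PySem.Dict.getD_of_get?_eq_some _ _ hg]
            have : w ∈ PySem.Dict.values d := by
              have := PySem.Dict.mem_items_of_get?_eq_some _ hg
              simp only [PySem.Dict.values]
              exact List.mem_map.mpr ⟨_, this, rfl⟩
            exact (hd w this).1
        · exact pvAdd_ne_nil _ _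
      · exact hd v h

theorem pvGroups_mem (points : List (List Int)) (x y : Int) :
    x ∈ PySem.Dict.getD (pvGroups points) y PySem.Set.empty
      ↔ (x, y) ∈ points.map (fun p => ((p.getD 0 0 : Int), (p.getD 1 0 : Int))) := by
  rw [pvGroups, pvGroups_mem_aux]
  simp [PySem.Dict.getD_empty, PySem.Set.empty]

theorem pvGroups_values_good (points : List (List Int)) :
    ∀ v ∈ PySem.Dict.values (pvGroups points), v.Nodup ∧ v ≠ [] := by
  apply pvGroups_values_good_aux
  simp [PySem.Dict.values, PySem.Dict.empty]

theorem pvGroups_keys_nodup (points : List (List Int)) : (PySem.Dict.keys (pvGroups points)).Nodup := by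
  rw [pvGroups]
  exact PySem.Dict.nodup_keys_foldl_insert_key points (fun p => p.getD 1 0)
    (fun d p => PySem.Set.add (PySem.Dict.getD d (p.getD 1 0) PySem.Set.empty) (p.getD 0 0))
    PySem.Dict.empty PySem.Dict.nodup_keys_empty

theorem pvGroups_mem_values (points : List (List Int)) (v : PySem.Set Int) :
    v ∈ PySem.Dict.values (pvGroups points) ↔
      ∃ y ∈ PySem.Dict.keys (pvGroups points), PySem.Dict.getD (pvGroups points) y PySem.Set.empty = v := by
  rw [PySem.Dict.values_eq_map_keys _ (pvGroups_keys_nodup points) PySem.Set.empty]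
  simp [List.mem_map]

theorem pvGroups_getD_mem_values (points : List (List Int)) (y : Int)
    (h : PySem.Dict.getD (pvGroups points) y PySem.Set.empty ≠ []) :
    PySem.Dict.getD (pvGroups points) y PySem.Set.empty ∈ PySem.Dict.values (pvGroups points) := by
  rw [pvGroups_mem_values]
  refine ⟨y, ?_, rfl⟩
  by_contra hk
  apply h
  rw [PySem.Dict.getD_eq_get?_getD, (PySem.Dict.get?_eq_none_iff_not_mem_keys _ _).mpr hk]
  rfl

-- ---- the main equivalence ----
theorem isReflection_spec_aux (points : List (List Int)) :
    isReflection points = isReflection_alt points := by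
  cases points with
  | nil => rfl
  | cons p0 rest =>
    set pairs := (p0 :: rest).map (fun p => ((p.getD 0 0 : Int), (p.getD 1 0 : Int))) with hpairs
    set xs := (p0 :: rest).map (fun p => p.getD 0 0) with hxs
    -- A's fold split into its three components
    have hsplitA := pvFoldSplit (p0 :: rest) (PySem.Set.empty, none, none)
    have hminA : xs.foldl pvOMin none = some ((xs.tail).foldl min (p0.getD 0 0)) := by
      simp [hxs, pvOMinFold, pvOMin]
    have hmaxA : xs.foldl pvOMax none = some ((xs.tail).foldl max (p0.getD 0 0)) := by
      simp [hxs, pvOMaxFold, pvOMax]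
    have hminq : PySem.List.min? xs (fun v => v) = some ((xs.tail).foldl min (p0.getD 0 0)) := by
      simp [hxs, PySem.List.min?_id_cons]
    have hmaxq : PySem.List.max? xs (fun v => v) = some ((xs.tail).foldl max (p0.getD 0 0)) := by
      simp [hxs, PySem.List.max?_id_cons]
    -- B's grouping dict and its x-multiset
    have hmem_allX : ∀ x : Int,
        x ∈ (PySem.Dict.values (pvGroups (p0 :: rest))).flatMap (fun v => v) ↔ x ∈ xs := by
      intro x
      rw [List.mem_flatMap]
      constructor
      · rintro ⟨v, hv, hx⟩
        obtain ⟨y, hy, hgetD⟩ := (pvGroups_mem_values (p0 :: rest) v).mp hv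
        have hpair : (x, y) ∈ pairs :=
          (pvGroups_mem (p0 :: rest) x y).mp (by rw [hgetD]; exact hx)
        rcases List.mem_map.mp hpair with ⟨p, hp, he⟩
        exact List.mem_map.mpr ⟨p, hp, congrArg Prod.fst he⟩
      · intro hx
        rcases List.mem_map.mp hx with ⟨p, hp, he⟩
        have hpair : (x, p.getD 1 0) ∈ pairs :=
          List.mem_map.mpr ⟨p, hp, by rw [he]⟩
        have hxin : x ∈ PySem.Dict.getD (pvGroups (p0 :: rest)) (p.getD 1 0) PySem.Set.empty :=
          (pvGroups_mem (p0 :: rest) x (p.getD 1 0)).mpr hpair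
        have hne : PySem.Dict.getD (pvGroups (p0 :: rest)) (p.getD 1 0) PySem.Set.empty ≠ [] := by
          intro h0; rw [h0] at hxin; simp at hxin
        exact ⟨_, pvGroups_getD_mem_values (p0 :: rest) (p.getD 1 0) hne, hxin⟩
    -- B's min/max exist and agree with A's
    have hx0 : (p0.getD 0 0 : Int) ∈ xs := by rw [hxs]; exact List.mem_map.mpr ⟨p0, List.mem_cons_self, rfl⟩
    have hallX_ne : (PySem.Dict.values (pvGroups (p0 :: rest))).flatMap (fun v => v) ≠ [] := by
      intro h0
      have := (hmem_allX (p0.getD 0 0)).mpr hx0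
      rw [h0] at this; simp at this
    obtain ⟨mB, hmB⟩ : ∃ m, PySem.List.min? ((PySem.Dict.values (pvGroups (p0 :: rest))).flatMap (fun v => v)) (fun v => v) = some m := by
      cases hm : PySem.List.min? ((PySem.Dict.values (pvGroups (p0 :: rest))).flatMap (fun v => v)) (fun v => v) with
      | none => exact absurd ((PySem.List.min?_eq_none_iff _ _).mp hm) hallX_ne
      | some m => exact ⟨m, rfl⟩
    obtain ⟨MB, hMB⟩ : ∃ m, PySem.List.max? ((PySem.Dict.values (pvGroups (p0 :: rest))).flatMap (fun v => v)) (fun v => v) = some m := by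
      cases hm : PySem.List.max? ((PySem.Dict.values (pvGroups (p0 :: rest))).flatMap (fun v => v)) (fun v => v) with
      | none => exact absurd ((PySem.List.max?_eq_none_iff _ _).mp hm) hallX_ne
      | some m => exact ⟨m, rfl⟩
    have hminEq : (xs.tail).foldl min (p0.getD 0 0) = mB := by
      have h1 : ∀ y ∈ xs, (xs.tail).foldl min (p0.getD 0 0) ≤ y := by
        have := PySem.List.min?_isMin hminq; simpa using this
      have h2 : (xs.tail).foldl min (p0.getD 0 0) ∈ xs := PySem.List.min?_mem hminq
      have h3 : ∀ y ∈ (PySem.Dict.values (pvGroups (p0 :: rest))).flatMap (fun v => v), mB ≤ y := by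
        have := PySem.List.min?_isMin hmB; simpa using this
      have h4 : mB ∈ (PySem.Dict.values (pvGroups (p0 :: rest))).flatMap (fun v => v) := PySem.List.min?_mem hmB
      exact le_antisymm (h1 mB ((hmem_allX mB).mp h4)) (h3 _ ((hmem_allX _).mpr h2))
    have hmaxEq : (xs.tail).foldl max (p0.getD 0 0) = MB := by
      have h1 : ∀ y ∈ xs, y ≤ (xs.tail).foldl max (p0.getD 0 0) := by
        have := PySem.List.max?_isMax hmaxq; simpa using this
      have h2 : (xs.tail).foldl max (p0.getD 0 0) ∈ xs := PySem.List.max?_mem hmaxq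
      have h3 : ∀ y ∈ (PySem.Dict.values (pvGroups (p0 :: rest))).flatMap (fun v => v), y ≤ MB := by
        have := PySem.List.max?_isMax hMB; simpa using this
      have h4 : MB ∈ (PySem.Dict.values (pvGroups (p0 :: rest))).flatMap (fun v => v) := PySem.List.max?_mem hMB
      exact le_antisymm (h3 _ ((hmem_allX _).mpr h2)) (h1 MB ((hmem_allX MB).mp h4))
    set s := mB + MB with hs
    -- A reduced to its membership check
    have hA : isReflection (p0 :: rest) = isReflectionCheck s (pairs.foldl PySem.Set.add PySem.Set.empty) (p0 :: rest) := by
      unfold isReflection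
      rw [hsplitA]
      have e1 : ((PySem.Set.empty (α := Int × Int), (none : Option Int), (none : Option Int))).2.1 = none := rfl
      have e2 : ((PySem.Set.empty (α := Int × Int), (none : Option Int), (none : Option Int))).2.2 = none := rfl
      rw [e1, e2, ← hxs, hminA, hmaxA, hminEq, hmaxEq]
    have hSmem : ∀ q, q ∈ pairs.foldl PySem.Set.add PySem.Set.empty ↔ q ∈ pairs := by
      intro q
      have h0 : (PySem.Set.empty : PySem.Set (Int × Int)) = [] := rfl
      rw [h0, ← PySem.Set.ofList_eq_foldl pairs]
      exact PySem.Set.mem_ofList pairs q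
    -- A's truth condition: closure of pairs under the mirror
    have hAiff : isReflection (p0 :: rest) = true ↔ ∀ q ∈ pairs, ((s - q.1, q.2) : Int × Int) ∈ pairs := by
      rw [hA, pvCheck_iff]
      constructor
      · intro h q hq
        rcases List.mem_map.mp hq with ⟨p, hp, rfl⟩
        exact (hSmem _).mp (h p hp)
      · intro h p hp
        exact (hSmem _).mpr (h (p.getD 0 0, p.getD 1 0) (List.mem_map.mpr ⟨p, hp, rfl⟩))
    -- B reduced to the per-group two-pointer checks
    have hB : isReflection_alt (p0 :: rest) =
        (PySem.Dict.values (pvGroups (p0 :: rest))).all (fun v =>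
          twoPtrCheck (PySem.List.sorted v (fun v => v) false) s 0
            ((PySem.List.sorted v (fun v => v) false).length - 1)) := by
      show ((fun G =>
        (PySem.Dict.values G).all (fun v =>
          twoPtrCheck (PySem.List.sorted v (fun v => v) false)
            (((PySem.List.min? ((PySem.Dict.values G).flatMap (fun v => v)) (fun v => v)).getD 0)
              + ((PySem.List.max? ((PySem.Dict.values G).flatMap (fun v => v)) (fun v => v)).getD 0)) 0
            ((PySem.List.sorted v (fun v => v) false).length - 1))) (pvGroups (p0 :: rest))) = _
      simp only
      rw [hmB, hMB]
      simp only [Option.getD_some, hs]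
    -- each group's two-pointer check is closure of the group under x ↦ s - x
    have hgrp : ∀ v ∈ PySem.Dict.values (pvGroups (p0 :: rest)),
        (twoPtrCheck (PySem.List.sorted v (fun v => v) false) s 0
            ((PySem.List.sorted v (fun v => v) false).length - 1) = true
          ↔ ∀ x ∈ v, s - x ∈ v) := by
      intro v hv
      obtain ⟨hnd, hvne⟩ := pvGroups_values_good (p0 :: rest) v hv
      have hlne : PySem.List.sorted v (fun v => v) false ≠ [] := by
        rw [Ne, PySem.List.sorted_eq_nil_iff]; exact hvne
      have hlnd : (PySem.List.sorted v (fun v => v) false).Nodup :=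
        (PySem.List.sorted_perm v (fun v => v) false).nodup_iff.mpr hnd
      have hpw : (PySem.List.sorted v (fun v => v) false).Pairwise (· < ·) := by
        have h1 := PySem.List.sorted_pairwise v (fun v => v)
        exact (h1.and hlnd).imp (fun hab => lt_of_le_of_ne hab.1 hab.2)
      rw [twoPtr_iff (PySem.List.sorted v (fun v => v) false) s
            ((PySem.List.sorted v (fun v => v) false).length + 1) 0
            ((PySem.List.sorted v (fun v => v) false).length - 1) (by omega)]
      have hpair := pairing_iff_closed (PySem.List.sorted v (fun v => v) false) s hlne hpw
      constructor
      · intro h x hx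
        rw [← PySem.List.mem_sorted v (fun v => v) false]
        refine hpair.mp ?_ x ((PySem.List.mem_sorted v (fun v => v) false x).mpr hx)
        intro k hk
        have := h k (Nat.zero_le k) hk
        rw [Nat.zero_add] at this
        exact this
      · intro h k _ hk
        rw [Nat.zero_add]
        refine hpair.mpr ?_ k hk
        intro x hx
        rw [PySem.List.mem_sorted]
        exact h x ((PySem.List.mem_sorted v (fun v => v) false x).mp hx)
    have hBiff : isReflection_alt (p0 :: rest) = true ↔
        ∀ v ∈ PySem.Dict.values (pvGroups (p0 :: rest)), ∀ x ∈ v, s - x ∈ v := by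
      rw [hB, List.all_eq_true]
      exact ⟨fun h v hv => (hgrp v hv).mp (h v hv), fun h v hv => (hgrp v hv).mpr (h v hv)⟩
    -- the two conditions are the same statement, read through the grouping dict
    have hcond : (∀ q ∈ pairs, ((s - q.1, q.2) : Int × Int) ∈ pairs) ↔
        (∀ v ∈ PySem.Dict.values (pvGroups (p0 :: rest)), ∀ x ∈ v, s - x ∈ v) := by
      constructor
      · intro h v hv x hx
        obtain ⟨y, hy, hgetD⟩ := (pvGroups_mem_values (p0 :: rest) v).mp hv
        have hpair : (x, y) ∈ pairs :=
          (pvGroups_mem (p0 :: rest) x y).mp (by rw [hgetD]; exact hx)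
        have := h (x, y) hpair
        have : s - x ∈ PySem.Dict.getD (pvGroups (p0 :: rest)) y PySem.Set.empty :=
          (pvGroups_mem (p0 :: rest) (s - x) y).mpr this
        rw [hgetD] at this; exact this
      · intro h q hq
        have hxin : q.1 ∈ PySem.Dict.getD (pvGroups (p0 :: rest)) q.2 PySem.Set.empty :=
          (pvGroups_mem (p0 :: rest) q.1 q.2).mpr (by rw [Prod.mk.eta]; exact hq)
        have hne : PySem.Dict.getD (pvGroups (p0 :: rest)) q.2 PySem.Set.empty ≠ [] := by
          intro h0; rw [h0] at hxin; simp at hxin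
        have hvin := pvGroups_getD_mem_values (p0 :: rest) q.2 hne
        have := h _ hvin q.1 hxin
        exact (pvGroups_mem (p0 :: rest) (s - q.1) q.2).mp this
    -- conclude by Bool case analysis
    cases hAval : isReflection (p0 :: rest) with
    | true =>
        exact (hBiff.mpr (hcond.mp (hAiff.mp hAval))).symm
    | false =>
        cases hBval : isReflection_alt (p0 :: rest) with
        | false => rfl
        | true =>
            have := hAiff.mpr (hcond.mpr (hBiff.mp hBval))
            rw [hAval] at this; exact absurd this (by simp)

-- ===== VERDICT (by name: the statement is the Claim_ definition above) =====
theorem isReflection_spec : Claim_equal_isReflection := by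
  intro points _ _
  unfold Spec_isReflection
  exact isReflection_spec_aux points
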